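-- pv_equiv track=rewrite | github.com/milkbottledude/woodlands-jb_tracker | python_scripts/rating_to_csv_to_joblib.py | week_numbering
-- ===== SOURCE A (Python) =====
-- def week_numbering(exact_date):
--     week_no = 1
--     for m in range(1, 4):
--         if exact_date < m * 7:
--             break
--         else:
--             week_no += 1
--     return week_no
-- ===== SOURCE B (Python) =====
-- def week_numbering(exact_date):
--     return min(max(exact_date // 7, 0), 3) + 1
-- ===== Notes on version B (the rewrite author's own statement) =====
-- stated objective: simpler
-- what changed: Replaced the bounded loop with a closed-form clamped integer division: min(max(exact_date // 7, 0), 3) + 1.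
import Mathlib
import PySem

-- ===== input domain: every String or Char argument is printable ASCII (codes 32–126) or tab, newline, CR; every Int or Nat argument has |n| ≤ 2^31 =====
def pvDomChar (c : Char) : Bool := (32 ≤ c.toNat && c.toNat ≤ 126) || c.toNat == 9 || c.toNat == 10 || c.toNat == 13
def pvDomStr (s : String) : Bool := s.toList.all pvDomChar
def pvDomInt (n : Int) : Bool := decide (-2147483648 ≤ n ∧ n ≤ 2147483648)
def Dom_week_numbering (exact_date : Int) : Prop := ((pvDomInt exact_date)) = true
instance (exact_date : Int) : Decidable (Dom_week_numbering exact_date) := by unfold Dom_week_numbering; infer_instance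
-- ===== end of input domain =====

-- B replaces A's bounded loop with a closed-form clamped integer division (simpler).

-- ===== PORT A =====
-- the 'for m in range(1,4)' loop with 'break': recursion over the remaining range values
def weekLoopA (exact_date : Int) : List Int → Int → Int
  | [], week_no => week_no
  | m :: rest, week_no =>
      if exact_date < m * 7 then week_no
      else weekLoopA exact_date rest (week_no + 1)

def week_numbering (exact_date : Int) : Int :=
  weekLoopA exact_date (PySem.List.pyRange 1 4 1) 1

-- ===== PORT B =====
def week_numbering_alt (exact_date : Int) : Int :=
  min (max (PySem.Int.floordiv exact_date 7) 0) 3 + 1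

-- ===== PRECONDITION & SPEC =====
def Spec_week_numbering (exact_date : Int) (out : Int) : Prop := out = week_numbering_alt exact_date
instance (exact_date : Int) (out : Int) : Decidable (Spec_week_numbering exact_date out) := by unfold Spec_week_numbering; infer_instance

-- ===== CLAIM (what is proved, stated in full; the proofs are below) =====
def Claim_equal_week_numbering : Prop := ∀ (exact_date : Int), Dom_week_numbering exact_date → Spec_week_numbering exact_date (week_numbering exact_date)

-- ===== LEMMAS AND PROOFS =====
theorem pyRange_1_4 : PySem.List.pyRange 1 4 1 = [1, 2, 3] := by decide

-- ===== VERDICT (by name: the statement is the Claim_ definition above) =====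
theorem week_numbering_spec : Claim_equal_week_numbering := by
  intro x _
  unfold Spec_week_numbering week_numbering week_numbering_alt
  rw [pyRange_1_4, PySem.Int.floordiv_eq_ediv_of_pos (by omega)]
  simp only [weekLoopA]
  split_ifs <;> omega
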